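-- pv_equiv track=rewrite | github.com/AceRB-notabot/KanaShift | ports/python/phonoshift.py | is_all_upper_ascii
-- ===== SOURCE A (Python) =====
-- def is_all_upper_ascii(s: str) -> bool:
--     has_letter = False
--     for c in s:
--         if "a" <= c <= "z":
--             return False
--         if "A" <= c <= "Z":
--             has_letter = True
--     return has_letter
-- ===== SOURCE B (Python) =====
-- def is_all_upper_ascii(s: str) -> bool:
--     return any('A' <= c <= 'Z' for c in s) and not any('a' <= c <= 'z' for c in s)
-- ===== Notes on version B (the rewrite author's own statement) =====
-- stated objective: simpler
-- what changed: Replaced the single stateful loop with an early return and a has_letter flag by two independent any() scans combined with a boolean and.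
import Mathlib
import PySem

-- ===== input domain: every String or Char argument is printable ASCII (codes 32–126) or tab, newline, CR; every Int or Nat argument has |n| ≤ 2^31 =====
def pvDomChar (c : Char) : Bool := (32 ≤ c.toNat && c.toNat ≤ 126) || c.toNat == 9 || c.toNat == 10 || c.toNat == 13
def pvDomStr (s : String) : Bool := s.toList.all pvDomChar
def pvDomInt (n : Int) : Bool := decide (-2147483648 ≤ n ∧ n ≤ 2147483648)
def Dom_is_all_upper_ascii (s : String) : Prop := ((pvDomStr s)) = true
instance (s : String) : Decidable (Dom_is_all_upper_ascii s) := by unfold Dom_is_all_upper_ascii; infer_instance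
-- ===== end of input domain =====

-- B replaces A's single stateful loop (early return + has_letter flag) by two independent any-scans combined with a boolean and: simpler decomposition, same O(n) cost.
-- ===== PORT A =====
-- A: one loop with early return on lowercase and a has_letter flag.
def is_all_upper_ascii_loop (l : List Char) (has_letter : Bool) : Bool :=
  match l with
  | [] => has_letter
  | c :: rest =>
    if 'a' ≤ c ∧ c ≤ 'z' then false
    else if 'A' ≤ c ∧ c ≤ 'Z' then is_all_upper_ascii_loop rest true
    else is_all_upper_ascii_loop rest has_letter

def is_all_upper_ascii (s : String) : Bool :=
  is_all_upper_ascii_loop s.toList false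

-- ===== PORT B =====
-- B: two independent scans combined with && (simpler decomposition).
def is_all_upper_ascii_alt (s : String) : Bool :=
  (s.toList.any (fun c => decide ('A' ≤ c ∧ c ≤ 'Z'))) &&
  !(s.toList.any (fun c => decide ('a' ≤ c ∧ c ≤ 'z')))

-- ===== PRECONDITION & SPEC =====
def Spec_is_all_upper_ascii (s : String) (out : Bool) : Prop := out = is_all_upper_ascii_alt s
instance (s : String) (out : Bool) : Decidable (Spec_is_all_upper_ascii s out) := by unfold Spec_is_all_upper_ascii; infer_instance

-- ===== CLAIM (what is proved, stated in full; the proofs are below) =====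
def Claim_equal_is_all_upper_ascii : Prop := ∀ (s : String), Dom_is_all_upper_ascii s → Spec_is_all_upper_ascii s (is_all_upper_ascii s)

-- ===== LEMMAS AND PROOFS =====

-- ===== VERDICT (by name: the statement is the Claim_ definition above) =====
theorem loop_eq (l : List Char) (acc : Bool) :
    is_all_upper_ascii_loop l acc =
      ((acc || l.any (fun c => decide ('A' ≤ c ∧ c ≤ 'Z'))) &&
       !(l.any (fun c => decide ('a' ≤ c ∧ c ≤ 'z')))) := by
  induction l generalizing acc with
  | nil => simp [is_all_upper_ascii_loop]
  | cons c rest ih =>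
    simp only [is_all_upper_ascii_loop, List.any_cons]
    by_cases h1 : 'a' ≤ c ∧ c ≤ 'z'
    · simp [h1]
    · have hnl : (decide ('a' ≤ c) && decide (c ≤ 'z')) = false := by
        rcases not_and_or.mp h1 with h | h <;> simp [h]
      by_cases h2 : 'A' ≤ c ∧ c ≤ 'Z'
      · simp [h2, hnl, ih]
      · simp [h1, h2, ih]

theorem is_all_upper_ascii_spec : Claim_equal_is_all_upper_ascii := by
  intro s _
  unfold Spec_is_all_upper_ascii is_all_upper_ascii is_all_upper_ascii_alt
  simp [loop_eq]
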